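-- pv_equiv track=rewrite | github.com/PablosTsel/ass2 | solver.py | choose_branch_literal
-- ===== SOURCE A (Python) =====
-- def clause_status(clause, assignment):
--     unassigned_lits = []
--
--     for lit in clause:
--         var = abs(lit)
--         sign = lit > 0
--
--         if var in assignment:
--             if assignment[var] == sign:
--                 return "SAT"  # some literal is true
--             # else this literal is false, check others
--         else:
--             unassigned_lits.append(lit)
--
--     # No literal was true
--     if not unassigned_lits:
--         # All literals assigned and false
--         return "UNSAT"
--
--     if len(unassigned_lits) == 1:
--         return ("UNIT", unassigned_lits[0])
--
--     return "UNDEF"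
--
-- def choose_branch_literal(clauses, assignment):
--     # 1) Find the minimum length of any not-yet-satisfied clause
--     min_len = None
--     for clause in clauses:
--         status = clause_status(clause, assignment)
--         if status == "SAT":
--             continue
--         if status == "UNSAT":
--             # contradiction will be handled elsewhere
--             continue
--
--         # collect unassigned literals in this clause
--         unassigned = []
--         for lit in clause:
--             var = abs(lit)
--             if var not in assignment:
--                 unassigned.append(lit)
--
--         if not unassigned:
--             continue
--
--         length = len(unassigned)
--         if min_len is None or length < min_len:
--             min_len = length
--
--     if min_len is None:
--         # no clause to branch on -> treat as model or let caller handle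
--         return None
--
--     # 2) Among clauses of that min length, count literal occurrences
--     counts = {}  # lit -> frequency
--     for clause in clauses:
--         status = clause_status(clause, assignment)
--         if status == "SAT":
--             continue
--         if status == "UNSAT":
--             continue
--
--         unassigned = []
--         for lit in clause:
--             var = abs(lit)
--             if var not in assignment:
--                 unassigned.append(lit)
--
--         if len(unassigned) != min_len:
--             continue
--
--         for lit in unassigned:
--             counts[lit] = counts.get(lit, 0) + 1
--
--     if not counts:
--         return None
--
--     # 3) Pick the literal with the highest count
--     best_lit = max(counts, key=counts.get)
--     return best_lit
-- ===== SOURCE B (Python) =====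
-- def choose_branch_literal(clauses, assignment):
--     # Single online pass: keep the current minimum unassigned-clause length and
--     # the literal counts for that length, resetting the counter whenever a
--     # strictly shorter clause appears; no second pass over the clause list.
--     cur = None
--     counts = {}
--     for clause in clauses:
--         if any(assignment.get(abs(l)) == (l > 0) for l in clause):
--             continue  # clause already satisfied
--         unassigned = [l for l in clause if abs(l) not in assignment]
--         if not unassigned:
--             continue  # fully assigned and false; handled elsewhere
--         n = len(unassigned)
--         if cur is None or n < cur:
--             cur = n
--             counts = {}
--         if n == cur:
--             for l in unassigned:
--                 counts[l] = counts.get(l, 0) + 1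
--     if cur is None:
--         return None
--     return max(counts, key=counts.get)
-- ===== Notes on version B (the rewrite author's own statement) =====
-- stated objective: alternative
-- what changed: B replaces A's two staged full passes (first computing the global minimum clause length via clause_status, then re-scanning every clause to count literals of that length) with a single online pass that maintains the running minimum and its literal counter simultaneously, resetting the counter whenever a strictly shorter unsatisfied clause appears.
import Mathlib
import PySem

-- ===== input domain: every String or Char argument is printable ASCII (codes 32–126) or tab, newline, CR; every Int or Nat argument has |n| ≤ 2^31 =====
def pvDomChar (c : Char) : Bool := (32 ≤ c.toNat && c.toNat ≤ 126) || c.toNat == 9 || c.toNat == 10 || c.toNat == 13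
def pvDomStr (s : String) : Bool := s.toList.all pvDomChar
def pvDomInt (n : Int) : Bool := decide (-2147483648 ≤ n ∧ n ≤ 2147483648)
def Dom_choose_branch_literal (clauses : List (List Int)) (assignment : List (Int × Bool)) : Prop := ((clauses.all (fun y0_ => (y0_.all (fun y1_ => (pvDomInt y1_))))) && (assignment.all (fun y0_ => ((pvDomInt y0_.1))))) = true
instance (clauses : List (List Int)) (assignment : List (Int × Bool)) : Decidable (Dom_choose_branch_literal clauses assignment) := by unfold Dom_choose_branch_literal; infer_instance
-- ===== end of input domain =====

-- B replaces A's two staged passes (global minimum first, then a re-scan counting literals of that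
-- length) by a single online pass keeping the running minimum and its literal counter together,
-- resetting the counter when a strictly shorter unsatisfied clause appears (objective: alternative).

-- ===== PORT A =====
inductive CStatus
  | SAT | UNSAT | UNDEF
  | UNIT (l : Int)
deriving DecidableEq, Repr

-- the 'for lit in clause' loop of clause_status, with its unassigned_lits accumulator
def clause_status_loop (assignment : List (Int × Bool)) (unassigned : List Int) : List Int → CStatus
  | [] =>
    if unassigned = [] then .UNSAT
    else if unassigned.length = 1 then .UNIT unassigned.headI
    else .UNDEF
  | lit :: rest =>
    match (PySem.Dict.mk assignment).get? |lit| with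
    | some v => if v = decide (lit > 0) then .SAT else clause_status_loop assignment unassigned rest
    | none => clause_status_loop assignment (unassigned ++ [lit]) rest

def clause_status (clause : List Int) (assignment : List (Int × Bool)) : CStatus :=
  clause_status_loop assignment [] clause

-- the 'collect unassigned literals' loop that appears verbatim in both of A's passes
def a_unassigned (assignment : List (Int × Bool)) (clause : List Int) : List Int :=
  clause.foldl (fun u lit =>
    if ((PySem.Dict.mk assignment).get? |lit|).isNone then u ++ [lit] else u) []

def choose_branch_literal (clauses : List (List Int)) (assignment : List (Int × Bool)) : Option Int :=
  -- 1) minimum number of unassigned literals over not-yet-satisfied clauses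
  let min_len : Option Nat := clauses.foldl (fun m clause =>
    if clause_status clause assignment = .SAT then m
    else if clause_status clause assignment = .UNSAT then m
    else if a_unassigned assignment clause = [] then m
    else
      match m with
      | none => some (a_unassigned assignment clause).length
      | some ml => if (a_unassigned assignment clause).length < ml
                   then some (a_unassigned assignment clause).length else m) none
  match min_len with
  | none => none
  | some ml =>
    -- 2) count literal occurrences among clauses of that minimum length
    let counts : PySem.Dict Int Int := clauses.foldl (fun c clause =>
      if clause_status clause assignment = .SAT then c
      else if clause_status clause assignment = .UNSAT then c
      else if (a_unassigned assignment clause).length ≠ ml then c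
      else (a_unassigned assignment clause).foldl
        (fun c lit => c.insert lit (c.getD lit 0 + 1)) c) PySem.Dict.empty
    if counts.items = [] then none
    -- 3) literal with the highest count (max over the dict's keys, key=counts.get)
    else PySem.List.max? counts.keys (fun k => counts.getD k 0)

-- ===== PORT B =====
-- B's per-clause state update: 'if cur is None or n < cur: cur, counts = n, {}' then
-- 'if n == cur: count the literals of this clause'
def streamStep (st : Option Nat × PySem.Dict Int Int) (u : List Int) :
    Option Nat × PySem.Dict Int Int :=
  let n := u.length
  let st1 := match st.1 with
    | none => (some n, (PySem.Dict.empty : PySem.Dict Int Int))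
    | some c => if n < c then (some n, PySem.Dict.empty) else st
  if st1.1 = some n then
    (st1.1, u.foldl (fun cnt l => cnt.insert l (cnt.getD l 0 + 1)) st1.2)
  else st1

def choose_branch_literal_alt (clauses : List (List Int)) (assignment : List (Int × Bool)) : Option Int :=
  let st := clauses.foldl (fun (st : Option Nat × PySem.Dict Int Int) clause =>
    if clause.any (fun l => ((PySem.Dict.mk assignment).get? |l|) == some (decide (l > 0))) then st
    else
      let unassigned := clause.filter (fun l => ((PySem.Dict.mk assignment).get? |l|).isNone)
      if unassigned = [] then st
      else streamStep st unassigned)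
    (none, PySem.Dict.empty)
  match st.1 with
  | none => none
  | some _ => PySem.List.max? st.2.keys (fun k => st.2.getD k 0)

-- ===== PRECONDITION & SPEC =====
def Spec_choose_branch_literal (clauses : List (List Int)) (assignment : List (Int × Bool)) (out : Option Int) : Prop := out = choose_branch_literal_alt clauses assignment
instance (clauses : List (List Int)) (assignment : List (Int × Bool)) (out : Option Int) : Decidable (Spec_choose_branch_literal clauses assignment out) := by unfold Spec_choose_branch_literal; infer_instance

-- ===== CLAIM (what is proved, stated in full; the proofs are below) =====
def Claim_equal_choose_branch_literal : Prop := ∀ (clauses : List (List Int)) (assignment : List (Int × Bool)), Dom_choose_branch_literal clauses assignment → Spec_choose_branch_literal clauses assignment (choose_branch_literal clauses assignment)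

-- ===== LEMMAS AND PROOFS =====

-- the two per-literal tests
def satP (assignment : List (Int × Bool)) (l : Int) : Bool :=
  ((PySem.Dict.mk assignment).get? |l|) == some (decide (l > 0))

def unassignedP (assignment : List (Int × Bool)) (lit : Int) : Bool :=
  ((PySem.Dict.mk assignment).get? |lit|).isNone

theorem a_unassigned_eq_filter (assignment : List (Int × Bool)) (clause : List Int) :
    a_unassigned assignment clause = clause.filter (unassignedP assignment) := by
  simpa [a_unassigned, unassignedP] using
    PySem.List.foldl_append_if_eq_filter (l := clause) (p := unassignedP assignment) (acc := [])

-- characterisation of A's clause_status loop by B's two tests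
theorem status_char (assignment : List (Int × Bool)) :
    ∀ (rest u0 : List Int),
      clause_status_loop assignment u0 rest =
        if rest.any (satP assignment) then .SAT
        else
          (if u0 ++ rest.filter (unassignedP assignment) = [] then .UNSAT
           else if (u0 ++ rest.filter (unassignedP assignment)).length = 1
                then .UNIT (u0 ++ rest.filter (unassignedP assignment)).headI
                else .UNDEF) := by
  intro rest
  induction rest with
  | nil => intro u0; simp [clause_status_loop]
  | cons lit rest ih =>
    intro u0
    simp only [clause_status_loop, List.any_cons, List.filter_cons]
    cases hg : (PySem.Dict.mk assignment).get? |lit| with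
    | some v =>
      by_cases hv : v = decide (lit > 0)
      · simp [satP, hg, hv]
      · have hs : satP assignment lit = false := by simp [satP, hg, hv]
        have hu : unassignedP assignment lit = false := by simp [unassignedP, hg]
        simp [hv, hs, hu, ih u0]
    | none =>
      have hs : satP assignment lit = false := by simp [satP, hg]
      have hu : unassignedP assignment lit = true := by simp [unassignedP, hg]
      rw [show ((match (none : Option Bool) with
            | some v => if v = decide (lit > 0) then CStatus.SAT
                        else clause_status_loop assignment u0 rest
            | none => clause_status_loop assignment (u0 ++ [lit]) rest) : CStatus)
          = clause_status_loop assignment (u0 ++ [lit]) rest from rfl,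
        ih (u0 ++ [lit])]
      simp [hs, hu, List.append_assoc]

-- the clause each pass keeps: none when satisfied or with no unassigned literal
def pick (assignment : List (Int × Bool)) (clause : List Int) : Option (List Int) :=
  if clause.any (satP assignment) then none
  else if clause.filter (unassignedP assignment) = [] then none
  else some (clause.filter (unassignedP assignment))

-- A's per-clause step of pass 1 (with the emptiness guard) in terms of pick
theorem step_eq1 {α : Type} (assignment : List (Int × Bool)) (clause : List Int)
    (m : α) (g : α → List Int → α) :
    (if clause_status clause assignment = .SAT then m
     else if clause_status clause assignment = .UNSAT then m
     else if a_unassigned assignment clause = [] then m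
     else g m (a_unassigned assignment clause)) =
    (match pick assignment clause with
     | none => m
     | some u => g m u) := by
  have hst := status_char assignment clause []
  simp only [List.nil_append] at hst
  rw [a_unassigned_eq_filter]
  by_cases ha : clause.any (satP assignment)
  · simp [clause_status, hst, ha, pick]
  · by_cases hnil : clause.filter (unassignedP assignment) = []
    · simp [clause_status, hst, ha, hnil, pick]
    · by_cases hone : (clause.filter (unassignedP assignment)).length = 1
      · simp [clause_status, hst, ha, hnil, hone, pick]
      · simp [clause_status, hst, ha, hnil, hone, pick]

-- A's per-clause step of pass 2 (no emptiness guard; UNSAT already skips empty) in terms of pick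
theorem step_eq2 {α : Type} (assignment : List (Int × Bool)) (clause : List Int)
    (m : α) (g : α → List Int → α) :
    (if clause_status clause assignment = .SAT then m
     else if clause_status clause assignment = .UNSAT then m
     else g m (a_unassigned assignment clause)) =
    (match pick assignment clause with
     | none => m
     | some u => g m u) := by
  have hst := status_char assignment clause []
  simp only [List.nil_append] at hst
  rw [a_unassigned_eq_filter]
  by_cases ha : clause.any (satP assignment)
  · simp [clause_status, hst, ha, pick]
  · by_cases hnil : clause.filter (unassignedP assignment) = []
    · simp [clause_status, hst, ha, hnil, pick]
    · by_cases hone : (clause.filter (unassignedP assignment)).length = 1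
      · simp [clause_status, hst, ha, hnil, hone, pick]
      · simp [clause_status, hst, ha, hnil, hone, pick]

-- B's per-clause step in terms of pick
theorem step_eqB (assignment : List (Int × Bool)) (clause : List Int)
    (st : Option Nat × PySem.Dict Int Int) :
    (if clause.any (fun l => ((PySem.Dict.mk assignment).get? |l|) == some (decide (l > 0))) then st
     else
       if clause.filter (fun l => ((PySem.Dict.mk assignment).get? |l|).isNone) = [] then st
       else streamStep st (clause.filter (fun l => ((PySem.Dict.mk assignment).get? |l|).isNone))) =
    (match pick assignment clause with
     | none => st
     | some u => streamStep st u) := by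
  have hsat : (fun l => ((PySem.Dict.mk assignment).get? |l|) == some (decide (l > 0))) = satP assignment := rfl
  have hun : (fun l => ((PySem.Dict.mk assignment).get? |l|).isNone) = unassignedP assignment := rfl
  rw [hsat, hun]
  unfold pick
  by_cases ha : clause.any (satP assignment) = true
  · rw [if_pos ha, if_pos ha]
  · rw [if_neg ha, if_neg ha]
    by_cases hnil : clause.filter (unassignedP assignment) = []
    · rw [if_pos hnil, if_pos hnil]
    · rw [if_neg hnil, if_neg hnil]

-- a fold that skips unpicked clauses is a fold over the picked ones
theorem foldl_pick {α : Type} (assignment : List (Int × Bool)) (g : α → List Int → α) :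
    ∀ (clauses : List (List Int)) (init : α),
      clauses.foldl (fun a clause =>
        match pick assignment clause with
        | none => a
        | some u => g a u) init
      = (clauses.filterMap (pick assignment)).foldl g init := by
  intro clauses
  induction clauses with
  | nil => intro init; simp
  | cons c cs ih =>
    intro init
    simp only [List.foldl_cons, List.filterMap_cons]
    cases hs : pick assignment c with
    | none => simp [ih]
    | some u => simp [ih]

-- A's pass-1 step over a picked clause list
def mnF (m : Option Nat) (u : List Int) : Option Nat :=
  match m with
  | none => some u.length
  | some ml => if u.length < ml then some u.length else m

-- counting all literals of a list of clauses into a dict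
def cntOf (L : List (List Int)) : PySem.Dict Int Int :=
  L.foldl (fun c u => u.foldl (fun c l => c.insert l (c.getD l 0 + 1)) c) PySem.Dict.empty

theorem mnF_foldl_isSome : ∀ (T : List (List Int)) (c : Nat),
    (T.foldl mnF (some c)).isSome := by
  intro T
  induction T with
  | nil => intro c; simp
  | cons v T ih =>
    intro c
    simp only [List.foldl_cons, mnF]
    by_cases h : v.length < c
    · simp only [if_pos h]; exact ih _
    · simp only [if_neg h]; exact ih _

theorem mn_le_aux : ∀ (T : List (List Int)) (m : Option Nat) (d : Nat),
    T.foldl mnF m = some d →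
    (∀ u ∈ T, d ≤ u.length) ∧ (∀ c, m = some c → d ≤ c) := by
  intro T
  induction T with
  | nil =>
    intro m d h
    simp at h
    exact ⟨by simp, fun c hc => by rw [hc] at h; simp at h; omega⟩
  | cons v T ih =>
    intro m d h
    simp only [List.foldl_cons] at h
    obtain ⟨h1, h2⟩ := ih (mnF m v) d h
    have hdv : d ≤ v.length := by
      cases m with
      | none => exact h2 v.length (by simp [mnF])
      | some c =>
        by_cases hv : v.length < c
        · exact h2 v.length (by simp [mnF, hv])
        · have := h2 c (by simp [mnF, hv])
          omega
    refine ⟨fun u hu => ?_, fun c hc => ?_⟩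
    · rcases List.mem_cons.mp hu with h | h
      · exact h ▸ hdv
      · exact h1 u h
    · subst hc
      by_cases hv : v.length < c
      · have := h2 v.length (by simp [mnF, hv]); omega
      · exact h2 c (by simp [mnF, hv])

-- the single-pass invariant: B's state is (running minimum, counts of the clauses at that minimum)
theorem stream_inv : ∀ (T : List (List Int)),
    T.foldl streamStep ((none : Option Nat), (PySem.Dict.empty : PySem.Dict Int Int)) =
      (T.foldl mnF none,
       match T.foldl mnF none with
       | none => PySem.Dict.empty
       | some ml => cntOf (T.filter (fun u => u.length = ml))) := by
  intro T
  induction T using List.reverseRecOn with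
  | nil => simp
  | append_singleton T u ih =>
    rw [List.foldl_append, List.foldl_append, ih]
    cases hmn : T.foldl mnF none with
    | none =>
      -- first kept clause: counter starts from scratch
      have hT : T = [] := by
        cases T with
        | nil => rfl
        | cons v T' =>
          exfalso
          have := mnF_foldl_isSome T' v.length
          simp only [List.foldl_cons, mnF] at hmn
          rw [hmn] at this; simp at this
      subst hT
      simp [streamStep, mnF, cntOf]
    | some c =>
      by_cases hlt : u.length < c
      · -- strictly shorter clause: reset
        have hfil : T.filter (fun v => v.length = u.length) = [] := by
          rw [List.filter_eq_nil_iff]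
          intro v hv
          have := (mn_le_aux T none c hmn).1 v hv
          simp only [decide_eq_true_eq]
          omega
        simp only [streamStep, List.foldl_cons, List.foldl_nil, mnF, hlt,
          List.filter_append]
        simp [cntOf, hfil]
      · by_cases heq : u.length = c
        · -- same minimum: accumulate into the current counter
          simp only [streamStep, List.foldl_cons, List.foldl_nil, mnF, if_neg hlt,
            List.filter_append]
          simp [cntOf, heq]
        · -- longer clause: state unchanged
          have hne : ¬ (some c = some u.length) := by
            intro h; exact heq (Option.some.inj h).symm
          simp only [streamStep, List.foldl_cons, List.foldl_nil, mnF, if_neg hlt,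
            List.filter_append, if_neg hne]
          have : (u.length = c) = False := by simp [heq]
          simp [heq]

-- A's final guard is redundant: max? of the keys of an items-empty dict is already none
theorem final_ite (C : PySem.Dict Int Int) :
    (if C.items = [] then none
     else PySem.List.max? C.keys (fun k => C.getD k 0))
    = PySem.List.max? C.keys (fun k => C.getD k 0) := by
  by_cases h : C.items = []
  · rw [if_pos h]
    exact ((PySem.List.max?_eq_none_iff _ _).mpr (by simp [PySem.Dict.keys, h])).symm
  · rw [if_neg h]

-- ===== VERDICT (by name: the statement is the Claim_ definition above) =====
theorem choose_branch_literal_spec : Claim_equal_choose_branch_literal := by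
  intro clauses assignment _
  show choose_branch_literal clauses assignment = choose_branch_literal_alt clauses assignment
  unfold choose_branch_literal choose_branch_literal_alt
  -- B's fold is the single-pass fold over the picked clauses
  have hB : clauses.foldl (fun (st : Option Nat × PySem.Dict Int Int) clause =>
      if clause.any (fun l => ((PySem.Dict.mk assignment).get? |l|) == some (decide (l > 0))) then st
      else
        if clause.filter (fun l => ((PySem.Dict.mk assignment).get? |l|).isNone) = [] then st
        else streamStep st (clause.filter (fun l => ((PySem.Dict.mk assignment).get? |l|).isNone)))
      (none, PySem.Dict.empty)
      = (clauses.filterMap (pick assignment)).foldl streamStep (none, PySem.Dict.empty) := by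
    rw [← foldl_pick assignment streamStep clauses (none, PySem.Dict.empty)]
    exact PySem.List.foldl_congr_mem _ _ _ _
      (fun st clause _ => step_eqB assignment clause st)
  rw [hB, stream_inv]
  -- A's min_len fold is the pass-1 fold over the picked clauses
  have hmin : clauses.foldl (fun m clause =>
      if clause_status clause assignment = .SAT then m
      else if clause_status clause assignment = .UNSAT then m
      else if a_unassigned assignment clause = [] then m
      else
        match m with
        | none => some (a_unassigned assignment clause).length
        | some ml => if (a_unassigned assignment clause).length < ml
                     then some (a_unassigned assignment clause).length else m)
      (none : Option Nat)
      = (clauses.filterMap (pick assignment)).foldl mnF none := by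
    rw [← foldl_pick assignment mnF clauses none]
    exact PySem.List.foldl_congr_mem _ _ _ _
      (fun m clause _ => step_eq1 assignment clause m mnF)
  rw [hmin]
  cases hmn : (clauses.filterMap (pick assignment)).foldl mnF none with
  | none => simp
  | some ml =>
    -- A's counting fold is the counting fold over picked clauses of the minimum length
    have hcnt : clauses.foldl (fun c clause =>
        if clause_status clause assignment = .SAT then c
        else if clause_status clause assignment = .UNSAT then c
        else if (a_unassigned assignment clause).length ≠ ml then c
        else (a_unassigned assignment clause).foldl
          (fun c lit => c.insert lit (c.getD lit 0 + 1)) c)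
        (PySem.Dict.empty : PySem.Dict Int Int)
        = cntOf ((clauses.filterMap (pick assignment)).filter (fun u => u.length = ml)) := by
      have h1 := PySem.List.foldl_congr_mem clauses
        (fun c clause =>
          if clause_status clause assignment = .SAT then c
          else if clause_status clause assignment = .UNSAT then c
          else if (a_unassigned assignment clause).length ≠ ml then c
          else (a_unassigned assignment clause).foldl
            (fun c lit => c.insert lit (c.getD lit 0 + 1)) c)
        (fun c clause =>
          match pick assignment clause with
          | none => c
          | some u => if u.length ≠ ml then c
                      else u.foldl (fun c lit => c.insert lit (c.getD lit 0 + 1)) c)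
        (PySem.Dict.empty : PySem.Dict Int Int)
        (fun c clause _ => step_eq2 assignment clause c
          (fun c u => if u.length ≠ ml then c
                      else u.foldl (fun c lit => c.insert lit (c.getD lit 0 + 1)) c))
      rw [h1, foldl_pick assignment _ clauses PySem.Dict.empty]
      have h2 : ∀ (L : List (List Int)) (init : PySem.Dict Int Int),
          L.foldl (fun c u => if u.length ≠ ml then c
            else u.foldl (fun c lit => c.insert lit (c.getD lit 0 + 1)) c) init
          = (L.filter (fun u => u.length = ml)).foldl
              (fun c u => u.foldl (fun c lit => c.insert lit (c.getD lit 0 + 1)) c) init := by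
        intro L
        induction L with
        | nil => intro init; simp
        | cons v L ihL =>
          intro init
          rw [List.foldl_cons, List.filter_cons]
          by_cases h : v.length = ml
          · rw [if_neg (fun hn => hn h), if_pos (by simp [h]), List.foldl_cons]
            exact ihL _
          · rw [if_pos h, if_neg (by simp [h])]
            exact ihL init
      rw [h2]
      rfl
    simp only [hcnt]
    exact final_ite _
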